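-- pv_equiv track=rewrite | github.com/cyberfalcons04/DOT-final-python-project | ENCRYPTION CODE.py | transform
-- ===== SOURCE A (Python) =====
-- def rot13_char(c):
--     if c.isalpha():
--         base = ord('A') if c.isupper() else ord('a')
--         return chr((ord(c) - base + 13) % 26 + base)
--     return c
--
-- def rot5_digit(c):
--     if c.isdigit():
--         return str((int(c) + 5) % 10)
--     return c
--
-- def symbol_rot5(c):
--     if not c.isalnum():
--         code = ord(c)
--         new_code = (code + 5) % 256
--         return chr(new_code)
--     return c
--
-- def transform(text):
--     result = []
--     for ch in text:
--         if ch.isalpha():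
--             result.append(rot13_char(ch))
--         elif ch.isdigit():
--             result.append(rot5_digit(ch))
--         else:
--             result.append(symbol_rot5(ch))
--     return ''.join(result)
-- ===== SOURCE B (Python) =====
-- def transform(text):
--     # Precompute one image per distinct character, then translate in one
--     # library-driven pass.
--     table = {}
--     for ch in set(text):
--         if ch.isalpha():
--             base = ord('A') if ch.isupper() else ord('a')
--             image = chr((ord(ch) - base + 13) % 26 + base)
--         elif ch.isdigit():
--             image = str((int(ch) + 5) % 10)
--         else:
--             image = chr((ord(ch) + 5) % 256)
--         table[ord(ch)] = image
--     return text.translate(table)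
-- ===== Notes on version B (the rewrite author's own statement) =====
-- stated objective: faster
-- what changed: Replaces the per-character dispatch-and-append loop with a translation table built once over the distinct characters of the input and applied in a single str.translate pass.
import Mathlib
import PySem

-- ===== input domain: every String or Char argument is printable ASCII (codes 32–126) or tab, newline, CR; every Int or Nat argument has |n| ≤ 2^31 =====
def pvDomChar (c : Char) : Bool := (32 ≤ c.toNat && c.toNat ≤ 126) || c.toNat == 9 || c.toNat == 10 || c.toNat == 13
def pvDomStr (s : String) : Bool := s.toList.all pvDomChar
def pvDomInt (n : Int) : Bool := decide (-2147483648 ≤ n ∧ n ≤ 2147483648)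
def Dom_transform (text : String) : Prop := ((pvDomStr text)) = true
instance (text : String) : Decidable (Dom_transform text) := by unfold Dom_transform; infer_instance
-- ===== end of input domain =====

-- B replaces A's per-character dispatch-and-append loop by a translation table
-- built once over the distinct characters, applied in one translate pass (idiomatic).

-- ord(c) / chr(n); chr is exact for 0 ≤ n < 0xD800, which covers every code computed here
def pvOrd (c : Char) : Int := (c.toNat : Int)
def pvChr (n : Int) : Char := Char.ofNat n.toNat

-- ===== PORT A =====
def rot13_char (c : Char) : String :=
  if PySem.Chars.isalpha c then
    let base : Int := if PySem.Chars.isupper c then pvOrd 'A' else pvOrd 'a'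
    String.ofList [pvChr (PySem.Int.mod (pvOrd c - base + 13) 26 + base)]
  else String.ofList [c]

-- int(c): ofStr? is some on the digit branch, so the getD default is unreachable
def rot5_digit (c : Char) : String :=
  if PySem.Chars.isdigit c then
    PySem.Int.toStr (PySem.Int.mod (((PySem.Int.ofStr? (String.ofList [c])).getD 0) + 5) 10)
  else String.ofList [c]

def symbol_rot5 (c : Char) : String :=
  if !(PySem.Chars.isalnum c) then
    String.ofList [pvChr (PySem.Int.mod (pvOrd c + 5) 256)]
  else String.ofList [c]

def transform (text : String) : String :=
  PySem.Str.join "" (text.toList.foldl (fun acc ch =>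
    acc ++ [if PySem.Chars.isalpha ch then rot13_char ch
            else if PySem.Chars.isdigit ch then rot5_digit ch
            else symbol_rot5 ch]) [])

-- ===== PORT B =====
-- the image computed inside B's table-building loop
def pvImage (ch : Char) : String :=
  if PySem.Chars.isalpha ch then
    let base : Int := if PySem.Chars.isupper ch then pvOrd 'A' else pvOrd 'a'
    String.ofList [pvChr (PySem.Int.mod (pvOrd ch - base + 13) 26 + base)]
  else if PySem.Chars.isdigit ch then
    PySem.Int.toStr (PySem.Int.mod (((PySem.Int.ofStr? (String.ofList [ch])).getD 0) + 5) 10)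
  else String.ofList [pvChr (PySem.Int.mod (pvOrd ch + 5) 256)]

-- table built over set(text); keys are distinct ords, lookups only afterwards,
-- so the (unmodelled) set iteration order cannot influence the result
def pvTable (text : String) : PySem.Dict Int String :=
  (PySem.Set.ofList text.toList).foldl
    (fun d ch => d.insert (pvOrd ch) (pvImage ch)) PySem.Dict.empty

-- text.translate(table): characters whose ord is a key are replaced by the
-- mapped string, all others kept
def transform_alt (text : String) : String :=
  PySem.Str.join ""
    (text.toList.map (fun ch => ((pvTable text).get? (pvOrd ch)).getD (String.ofList [ch])))

-- ===== PRECONDITION & SPEC =====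
def Spec_transform (text : String) (out : String) : Prop := out = transform_alt text
instance (text : String) (out : String) : Decidable (Spec_transform text out) := by unfold Spec_transform; infer_instance

-- ===== CLAIM (what is proved, stated in full; the proofs are below) =====
def Claim_equal_transform : Prop := ∀ (text : String), Dom_transform text → Spec_transform text (transform text)

-- ===== LEMMAS AND PROOFS =====

theorem pvOrd_inj {a b : Char} (h : pvOrd a = pvOrd b) : a = b := by
  have hn : a.toNat = b.toNat := by unfold pvOrd at h; exact_mod_cast h
  calc a = Char.ofNat a.toNat := (Char.ofNat_toNat a).symm
    _ = Char.ofNat b.toNat := by rw [hn]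
    _ = b := Char.ofNat_toNat b

theorem foldl_append_singleton (l : List Char) (f : Char → String) (acc : List String) :
    l.foldl (fun a c => a ++ [f c]) acc = acc ++ l.map f := by
  induction l generalizing acc with
  | nil => simp
  | cons a t ih => simp [List.foldl_cons, ih]

theorem get?_foldl_of_not_mem (l : List Char) (d : PySem.Dict Int String) (k : Int)
    (h : ∀ x ∈ l, pvOrd x ≠ k) :
    (l.foldl (fun d ch => d.insert (pvOrd ch) (pvImage ch)) d).get? k = d.get? k := by
  induction l generalizing d with
  | nil => rfl
  | cons a t ih =>
    rw [List.foldl_cons, ih _ (fun x hx => h x (List.mem_cons_of_mem a hx)),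
      PySem.Dict.get?_insert_of_ne _ _ (h a (List.mem_cons_self) ).symm]

theorem get?_foldl_of_mem (l : List Char) (d : PySem.Dict Int String) (c : Char)
    (hc : c ∈ l) (hnd : l.Nodup) :
    (l.foldl (fun d ch => d.insert (pvOrd ch) (pvImage ch)) d).get? (pvOrd c) = some (pvImage c) := by
  induction l generalizing d with
  | nil => cases hc
  | cons a t ih =>
    rw [List.foldl_cons]
    rcases List.mem_cons.mp hc with rfl | hct
    · rw [get?_foldl_of_not_mem _ _ _
        (fun x hx hne => (List.nodup_cons.mp hnd).1 (by rw [← pvOrd_inj hne]; exact hx)),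
        PySem.Dict.get?_insert_self]
    · exact ih _ hct (List.nodup_cons.mp hnd).2

theorem table_get (text : String) (c : Char) (hc : c ∈ text.toList) :
    (pvTable text).get? (pvOrd c) = some (pvImage c) := by
  unfold pvTable
  exact get?_foldl_of_mem _ _ _ ((PySem.Set.mem_ofList _ _).mpr hc) (PySem.Set.nodup_ofList _)

theorem piece_eq (ch : Char) :
    (if PySem.Chars.isalpha ch then rot13_char ch
     else if PySem.Chars.isdigit ch then rot5_digit ch
     else symbol_rot5 ch) = pvImage ch := by
  unfold rot13_char rot5_digit symbol_rot5 pvImage PySem.Chars.isalnum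
  by_cases ha : PySem.Chars.isalpha ch <;> by_cases hd : PySem.Chars.isdigit ch <;>
    simp [ha, hd]

theorem transform_eq_alt (text : String) : transform text = transform_alt text := by
  unfold transform transform_alt
  rw [foldl_append_singleton]
  congr 1
  simp only [List.nil_append]
  apply List.map_congr_left
  intro ch hch
  rw [piece_eq, table_get text ch hch, Option.getD_some]

-- ===== VERDICT (by name: the statement is the Claim_ definition above) =====
theorem transform_spec : Claim_equal_transform := by
  intro text _
  unfold Spec_transform
  exact transform_eq_alt text
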